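-- pv_equiv track=rewrite | github.com/lfbarba/smartt | smartt/training/train_sparse_sh.py | create_mumott_to_e3nn_mapping
-- ===== SOURCE A (Python) =====
-- def create_mumott_to_e3nn_mapping(lmax: int = 8):
--     """
--     Create a mapping from mumott's even-ℓ only representation to e3nn's full representation.
--
--     Mumott uses only even ℓ values: ℓ = 0, 2, 4, 6, 8
--     For each ℓ, it includes all m values: -ℓ, ..., +ℓ
--
--     This gives 45 coefficients for lmax=8:
--     - ℓ=0: 1 coeff (m=0)
--     - ℓ=2: 5 coeffs (m=-2,-1,0,1,2)
--     - ℓ=4: 9 coeffs (m=-4,...,4)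
--     - ℓ=6: 13 coeffs (m=-6,...,6)
--     - ℓ=8: 17 coeffs (m=-8,...,8)
--     Total: 45
--
--     e3nn uses all ℓ values: ℓ = 0, 1, 2, 3, 4, 5, 6, 7, 8
--     This gives 81 coefficients: (8+1)^2 = 81
--
--     Returns
--     -------
--     mumott_to_e3nn : list
--         List of e3nn indices corresponding to each mumott coefficient.
--         For odd ℓ coefficients not in mumott, we'll set them to zero.
--     """
--     mumott_to_e3nn = []
--     e3nn_idx = 0
--     mumott_idx = 0
--
--     for l in range(lmax + 1):
--         if l % 2 == 0:  # Even ℓ - these are in mumott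
--             for m in range(-l, l + 1):
--                 mumott_to_e3nn.append(e3nn_idx)
--                 e3nn_idx += 1
--         else:  # Odd ℓ - skip these in e3nn indexing
--             e3nn_idx += (2 * l + 1)
--
--     return mumott_to_e3nn
-- ===== SOURCE B (Python) =====
-- def create_mumott_to_e3nn_mapping(lmax: int = 8):
--     mumott_to_e3nn = []
--     for l in range(0, lmax + 1, 2):
--         mumott_to_e3nn.extend(range(l * l, (l + 1) ** 2))
--     return mumott_to_e3nn
-- ===== Notes on version B (the rewrite author's own statement) =====
-- stated objective: simpler
-- what changed: B iterates only over even l (step-2 range) and emits each l's e3nn indices as the closed-form contiguous block [l*l, (l+1)^2), eliminating A's running e3nn counter, the per-m inner loop and the odd-l skip branch.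
import Mathlib
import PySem

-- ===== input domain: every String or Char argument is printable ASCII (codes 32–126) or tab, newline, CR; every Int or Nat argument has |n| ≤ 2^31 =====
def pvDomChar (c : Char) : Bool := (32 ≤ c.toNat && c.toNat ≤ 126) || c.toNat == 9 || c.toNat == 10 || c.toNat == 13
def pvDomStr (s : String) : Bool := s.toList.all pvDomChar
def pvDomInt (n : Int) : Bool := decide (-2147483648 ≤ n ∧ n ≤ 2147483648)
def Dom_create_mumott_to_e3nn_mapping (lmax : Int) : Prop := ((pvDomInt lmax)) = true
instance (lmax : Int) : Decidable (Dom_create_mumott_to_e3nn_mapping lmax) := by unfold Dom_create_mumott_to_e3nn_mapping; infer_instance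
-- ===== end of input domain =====

-- B replaces A's running e3nn-index counter and odd-l skip branch with a step-2 loop
-- emitting each even l's contiguous index block [l*l, (l+1)^2) in closed form (objective: simpler).

-- ===== PORT A =====
def create_mumott_to_e3nn_mapping (lmax : Int) : List Int :=
  -- state: (mumott_to_e3nn, e3nn_idx); mumott_idx is dead in A and omitted
  ((PySem.List.pyRange 0 (lmax + 1) 1).foldl
    (fun (st : List Int × Int) l =>
      if PySem.Int.mod l 2 == 0 then
        (PySem.List.pyRange (-l) (l + 1) 1).foldl
          (fun (st2 : List Int × Int) _ => (st2.1 ++ [st2.2], st2.2 + 1)) st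
      else
        (st.1, st.2 + (2 * l + 1)))
    ([], 0)).1

-- ===== PORT B =====
def create_mumott_to_e3nn_mapping_alt (lmax : Int) : List Int :=
  (PySem.List.pyRange 0 (lmax + 1) 2).foldl
    (fun acc l => acc ++ PySem.List.pyRange (l * l) ((l + 1) ^ 2) 1) []

-- ===== PRECONDITION & SPEC =====
def Spec_create_mumott_to_e3nn_mapping (lmax : Int) (out : List Int) : Prop := out = create_mumott_to_e3nn_mapping_alt lmax
instance (lmax : Int) (out : List Int) : Decidable (Spec_create_mumott_to_e3nn_mapping lmax out) := by unfold Spec_create_mumott_to_e3nn_mapping; infer_instance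

-- ===== CLAIM (what is proved, stated in full; the proofs are below) =====
def Claim_equal_create_mumott_to_e3nn_mapping : Prop := ∀ (lmax : Int), Dom_create_mumott_to_e3nn_mapping lmax → Spec_create_mumott_to_e3nn_mapping lmax (create_mumott_to_e3nn_mapping lmax)

-- ===== LEMMAS AND PROOFS =====

-- A's inner m-loop only uses the length of the range it walks: it appends the
-- consecutive indices i, i+1, …, i+len-1 and leaves the counter at i+len.
lemma pv_inner_loop (r : List Int) (acc : List Int) (i : Int) :
    r.foldl (fun (st2 : List Int × Int) _ => (st2.1 ++ [st2.2], st2.2 + 1)) (acc, i)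
      = (acc ++ PySem.List.pyRange i (i + (r.length : Int)) 1, i + (r.length : Int)) := by
  induction r generalizing acc i with
  | nil => simp [PySem.List.pyRange_one_eq_nil (by omega : (i : Int) ≤ i + 0)]
  | cons x xs ih =>
      simp only [List.foldl_cons, ih]
      have h1 : PySem.List.pyRange i (i + ((xs.length : Int) + 1)) 1
          = i :: PySem.List.pyRange (i + 1) (i + ((xs.length : Int) + 1)) 1 :=
        PySem.List.pyRange_one_cons (by omega)
      have h2 : i + 1 + (xs.length : Int) = i + ((xs.length : Int) + 1) := by ring
      simp only [List.length_cons]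
      push_cast
      rw [h2, h1]
      simp

-- appending one endpoint to a step-2 range starting at 0
lemma pv_pyRange2_succ (n : Nat) :
    PySem.List.pyRange 0 ((n : Int) + 1) 2
      = PySem.List.pyRange 0 (n : Int) 2 ++ (if n % 2 = 0 then [(n : Int)] else []) := by
  rw [PySem.List.pyRange_of_pos _ _ (by norm_num), PySem.List.pyRange_of_pos _ _ (by norm_num)]
  by_cases h : n % 2 = 0
  · rw [if_pos h]
    have hc : (if (0:Int) < (n:Int) + 1 then (((n:Int) + 1 - 0 + 2 - 1) / 2).toNat else 0)
        = (if (0:Int) < (n:Int) then (((n:Int) - 0 + 2 - 1) / 2).toNat else 0) + 1 := by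
      split_ifs <;> omega
    rw [hc, List.range_succ, List.map_append]
    congr 1
    have he : (0:Int) + 2 * ((if (0:Int) < (n:Int) then (((n:Int) - 0 + 2 - 1) / 2).toNat else 0 : Nat) : Int)
        = (n : Int) := by
      split_ifs <;> push_cast <;> omega
    rw [List.map_singleton, he]
  · rw [if_neg h]
    have hc : (if (0:Int) < (n:Int) + 1 then (((n:Int) + 1 - 0 + 2 - 1) / 2).toNat else 0)
        = (if (0:Int) < (n:Int) then (((n:Int) - 0 + 2 - 1) / 2).toNat else 0) := by
      split_ifs <;> omega
    rw [hc, List.append_nil]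

-- main invariant: after A's loop has run over 0..n-1, its accumulator is exactly
-- B's concatenation of even blocks below n, and its counter is n².
lemma pv_key (n : Nat) :
    (PySem.List.pyRange 0 (n : Int) 1).foldl
        (fun (st : List Int × Int) l =>
          if PySem.Int.mod l 2 == 0 then
            (PySem.List.pyRange (-l) (l + 1) 1).foldl
              (fun (st2 : List Int × Int) _ => (st2.1 ++ [st2.2], st2.2 + 1)) st
          else
            (st.1, st.2 + (2 * l + 1)))
        ([], 0)
      = ((PySem.List.pyRange 0 (n : Int) 2).foldl
          (fun acc l => acc ++ PySem.List.pyRange (l * l) ((l + 1) ^ 2) 1) [],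
         (n : Int) ^ 2) := by
  induction n with
  | zero =>
      simp [PySem.List.pyRange_one_eq_nil (by omega : (0:Int) ≤ 0),
        PySem.List.pyRange_of_pos 0 0 (by norm_num : (0:Int) < 2)]
  | succ n ih =>
      have hr : PySem.List.pyRange 0 ((n : Int) + 1) 1
          = PySem.List.pyRange 0 (n : Int) 1 ++ [(n : Int)] :=
        PySem.List.pyRange_one_succ_right (by omega)
      push_cast
      rw [hr, List.foldl_append, ih, pv_pyRange2_succ, List.foldl_append]
      have hmod : (PySem.Int.mod (n : Int) 2 == 0) = (n % 2 == 0) := by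
        have hm : PySem.Int.mod (n : Int) 2 = ((n % 2 : Nat) : Int) := by
          simp [PySem.Int.mod, Int.fmod_eq_emod]
        rw [hm]
        rcases Nat.decEq (n % 2) 0 with h | h <;> simp [h] <;> omega
      by_cases h : n % 2 = 0
      · simp only [List.foldl_cons, List.foldl_nil, hmod, h, if_pos, beq_self_eq_true, if_true]
        have hlen : ((PySem.List.pyRange (-(n : Int)) ((n : Int) + 1) 1).length : Int)
            = 2 * (n : Int) + 1 := by
          rw [PySem.List.length_pyRange_one]
          omega
        rw [pv_inner_loop, hlen, Prod.mk.injEq]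
        refine ⟨by congr 1 <;> ring, by ring⟩
      · have hb : (n % 2 == 0) = false := by simp [h]
        simp only [List.foldl_cons, List.foldl_nil, hmod, hb, Bool.false_eq_true,
          if_false, h]
        rw [Prod.mk.injEq]
        exact ⟨rfl, by ring⟩

-- ===== VERDICT (by name: the statement is the Claim_ definition above) =====
theorem create_mumott_to_e3nn_mapping_spec : Claim_equal_create_mumott_to_e3nn_mapping := by
  intro lmax _
  unfold Spec_create_mumott_to_e3nn_mapping create_mumott_to_e3nn_mapping create_mumott_to_e3nn_mapping_alt
  by_cases h : lmax + 1 ≤ 0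
  · rw [PySem.List.pyRange_one_eq_nil (by omega),
      PySem.List.pyRange_of_pos _ _ (by norm_num : (0:Int) < 2), if_neg (by omega)]
    simp
  · have hn : lmax + 1 = ((lmax + 1).toNat : Int) := by omega
    rw [hn, pv_key]
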